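-- pv_equiv track=rewrite | github.com/igorol/advent_of_code | 2019/04/day4.py | two_consecutive_digits
-- ===== SOURCE A (Python) =====
-- from itertools import groupby
--
-- def two_consecutive_digits(passwd):
--     """
--     return True if contains 2 consecutive equal digits
--     """
--     digits = str(passwd)
--     groups = groupby(digits)
--     results = [(label, sum(1 for _ in group)) for label, group in groups]
--     results = [i[1] for i in results]
--     for result in results:
--         if result >= 2:
--             return True
--     return False
-- ===== SOURCE B (Python) =====
-- def two_consecutive_digits(passwd):
--     """
--     return True if contains 2 consecutive equal digits
--     """
--     digits = str(passwd)
--     return any(a == b for a, b in zip(digits, digits[1:]))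
-- ===== Notes on version B (the rewrite author's own statement) =====
-- stated objective: simpler
-- what changed: Replaces groupby run-length counting (build groups, count each, scan counts for >=2) with a single pairwise comparison of adjacent characters via zip.
import Mathlib
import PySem

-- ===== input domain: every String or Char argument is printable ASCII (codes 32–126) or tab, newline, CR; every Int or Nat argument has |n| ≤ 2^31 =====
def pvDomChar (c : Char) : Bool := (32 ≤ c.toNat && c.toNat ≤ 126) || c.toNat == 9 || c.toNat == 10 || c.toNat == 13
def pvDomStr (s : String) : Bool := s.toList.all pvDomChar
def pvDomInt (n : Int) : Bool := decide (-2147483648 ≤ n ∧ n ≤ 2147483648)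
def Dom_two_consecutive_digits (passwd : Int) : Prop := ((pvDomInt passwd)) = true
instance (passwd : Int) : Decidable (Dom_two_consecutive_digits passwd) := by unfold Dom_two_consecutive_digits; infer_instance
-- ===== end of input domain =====

-- B replaces A's groupby run-length counting with a single adjacent-pair comparison (objective: simpler).

-- ===== PORT A =====
-- itertools.groupby over the characters, as (label, run) pairs; here the run is already counted
-- (sum(1 for _ in group)), which is exactly the length of the consecutive run.
def pvRunsAux (c : Char) (n : Int) : List Char → List (Char × Int)
  | [] => [(c, n)]
  | d :: rest => if d = c then pvRunsAux c (n + 1) rest else (c, n) :: pvRunsAux d 1 rest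

def pvRuns : List Char → List (Char × Int)
  | [] => []
  | c :: rest => pvRunsAux c 1 rest

-- the final loop: early-return True on the first count >= 2
def pvAnyGE2 : List Int → Bool
  | [] => false
  | r :: rest => if r ≥ 2 then true else pvAnyGE2 rest

def two_consecutive_digits (passwd : Int) : Bool :=
  let digits := (PySem.Int.toStr passwd).toList
  let results := pvRuns digits
  let results := results.map (·.2)
  pvAnyGE2 results

-- ===== PORT B =====
-- any(a == b for a, b in zip(digits, digits[1:]))
def pvAdjEq : List Char → Bool
  | a :: b :: rest => a == b || pvAdjEq (b :: rest)
  | _ => false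

def two_consecutive_digits_alt (passwd : Int) : Bool :=
  pvAdjEq (PySem.Int.toStr passwd).toList

-- ===== PRECONDITION & SPEC =====
def Spec_two_consecutive_digits (passwd : Int) (out : Bool) : Prop := out = two_consecutive_digits_alt passwd
instance (passwd : Int) (out : Bool) : Decidable (Spec_two_consecutive_digits passwd out) := by unfold Spec_two_consecutive_digits; infer_instance

-- ===== CLAIM (what is proved, stated in full; the proofs are below) =====
def Claim_equal_two_consecutive_digits : Prop := ∀ (passwd : Int), Dom_two_consecutive_digits passwd → Spec_two_consecutive_digits passwd (two_consecutive_digits passwd)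

-- ===== LEMMAS AND PROOFS =====

theorem pvRunsAux_ge2 (l : List Char) (c : Char) (n : Int) (h : 2 ≤ n) :
    pvAnyGE2 ((pvRunsAux c n l).map (·.2)) = true := by
  induction l generalizing c n with
  | nil => simp [pvRunsAux, pvAnyGE2, h]
  | cons d rest ih =>
    by_cases hd : d = c
    · simpa [pvRunsAux, hd] using ih c (n + 1) (by omega)
    · simp [pvRunsAux, hd, pvAnyGE2, h]

theorem pvRunsAux_one (l : List Char) (c : Char) :
    pvAnyGE2 ((pvRunsAux c 1 l).map (·.2)) = pvAdjEq (c :: l) := by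
  induction l generalizing c with
  | nil => simp [pvRunsAux, pvAnyGE2, pvAdjEq]
  | cons d rest ih =>
    by_cases hd : d = c
    · subst hd
      simp [pvRunsAux, pvAdjEq, pvRunsAux_ge2 rest d 2 (by omega)]
    · have hdc : ¬ (c == d) = true := by simp [Ne.symm hd]
      simp [pvRunsAux, hd, pvAnyGE2, pvAdjEq, hdc, ih d]

theorem pvRuns_adj (l : List Char) :
    pvAnyGE2 ((pvRuns l).map (·.2)) = pvAdjEq l := by
  cases l with
  | nil => simp [pvRuns, pvAnyGE2, pvAdjEq]
  | cons c rest => simpa [pvRuns] using pvRunsAux_one rest c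

-- ===== VERDICT (by name: the statement is the Claim_ definition above) =====
theorem two_consecutive_digits_spec : Claim_equal_two_consecutive_digits := by
  intro passwd _
  unfold Spec_two_consecutive_digits two_consecutive_digits two_consecutive_digits_alt
  exact pvRuns_adj _
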